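-- pv_equiv track=rewrite | github.com/daniel-reich/ubiquitous-fiesta | TZXG9RfcZ7T3o43QF_7.py | same_length
-- ===== SOURCE A (Python) =====
-- def same_length(txt):
--     oCache = 0
--     zCache = 0
--     charCache = None
--     for i in txt:
--         if i == '1':
--             if charCache == '0':
--                 if oCache != zCache:
--                     return False
--                 oCache = 0
--                 zCache = 0
--             oCache +=1
--             charCache = '1'
--         elif i == '0':
--             zCache += 1
--             charCache = '0'
--         else:
--             return False
--     if oCache == zCache:
--         return True
--     else:
--         return False
-- ===== SOURCE B (Python) =====
-- def same_length(txt):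
--     if any(c not in '01' for c in txt):
--         return False
--     # run-length encode
--     runs = []
--     i = 0
--     n = len(txt)
--     while i < n:
--         j = i + 1
--         while j < n and txt[j] == txt[i]:
--             j += 1
--         runs.append((txt[i], j - i))
--         i = j
--     # runs must pair up as a 1-run followed by an equal 0-run
--     k = 0
--     while k < len(runs):
--         if k + 1 == len(runs):
--             return False
--         c1, n1 = runs[k]
--         _, n2 = runs[k + 1]
--         if c1 != '1' or n1 != n2:
--             return False
--         k += 2
--     return True
-- ===== Notes on version B (the rewrite author's own statement) =====
-- stated objective: alternative
-- what changed: B replaces A's single-pass counter state machine (running 1-count/0-count with a last-char cache) by a run-length encoding of the string followed by a scan over consecutive run pairs, rejecting non-binary characters up front.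
import Mathlib
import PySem

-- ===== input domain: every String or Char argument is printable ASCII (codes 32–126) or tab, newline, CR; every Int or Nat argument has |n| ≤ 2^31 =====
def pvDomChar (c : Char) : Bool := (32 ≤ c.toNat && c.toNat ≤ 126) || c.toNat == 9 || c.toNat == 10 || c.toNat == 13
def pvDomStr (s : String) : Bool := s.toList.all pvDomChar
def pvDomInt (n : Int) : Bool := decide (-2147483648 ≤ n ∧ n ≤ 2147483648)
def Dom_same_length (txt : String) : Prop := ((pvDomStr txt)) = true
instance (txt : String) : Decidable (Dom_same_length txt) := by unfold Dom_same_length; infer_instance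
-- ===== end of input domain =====

-- B replaces A's one-char-at-a-time counter machine by a run-length encoding followed by a
-- pass over run pairs (objective: simpler decomposition; no speed claim).

-- ===== PORT A =====
-- A's for-loop with early returns, as structural recursion over the chars with A's state (oCache, zCache, charCache)
def sameLenA : List Char → Int → Int → Option Char → Bool
  | [], o, z, _ => o == z
  | i :: rest, o, z, cc =>
    if i == '1' then
      if cc == some '0' then
        if o != z then false
        else sameLenA rest (0 + 1) 0 (some '1')
      else sameLenA rest (o + 1) z (some '1')
    else if i == '0' then
      sameLenA rest o (z + 1) (some '0')
    else
      false

def same_length (txt : String) : Bool := sameLenA txt.toList 0 0 none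

-- ===== PORT B =====
-- Source B's run-length-encoding while loop (inner while counts the run, outer jumps past it)
def rleB : List Char → List (Char × Int)
  | [] => []
  | c :: rest =>
    let k := (rest.takeWhile (fun x => x == c)).length
    (c, (1 : Int) + k) :: rleB (rest.drop k)
termination_by l => l.length
decreasing_by
  have h : (rest.drop ((rest.takeWhile (fun x => x == c)).length)).length ≤ rest.length :=
    le_trans (Nat.le_of_eq (List.length_drop ..)) (Nat.sub_le ..)
  simp only [List.length_cons]
  omega

-- Source B's pairing while loop: odd leftover run → False, each pair must be a '1'-run matched in length
def checkPairsB : List (Char × Int) → Bool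
  | [] => true
  | [_] => false
  | (c1, n1) :: (_, n2) :: rest =>
    if c1 != '1' || n1 != n2 then false else checkPairsB rest

def same_length_alt (txt : String) : Bool :=
  if txt.toList.any (fun c => !(c == '0' || c == '1')) then false
  else checkPairsB (rleB txt.toList)

-- ===== PRECONDITION & SPEC =====
def Spec_same_length (txt : String) (out : Bool) : Prop := out = same_length_alt txt
instance (txt : String) (out : Bool) : Decidable (Spec_same_length txt out) := by unfold Spec_same_length; infer_instance

-- ===== CLAIM (what is proved, stated in full; the proofs are below) =====
def Claim_equal_same_length : Prop := ∀ (txt : String), Dom_same_length txt → Spec_same_length txt (same_length txt)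

-- ===== LEMMAS AND PROOFS =====

theorem lem_ones : ∀ (p : ℕ) (t : List Char) (o : Int),
    sameLenA (List.replicate p '1' ++ t) o 0 (some '1') = sameLenA t (o + p) 0 (some '1') := by
  intro p
  induction p with
  | zero => intro t o; simp [List.replicate]
  | succ p ih =>
    intro t o
    rw [List.replicate_succ, List.cons_append]
    simp only [sameLenA]
    norm_num
    rw [if_neg (show ¬('1':Char) = '0' by decide), ih]
    congr 1
    ring

theorem lem_zeros : ∀ (q : ℕ) (t : List Char) (o z : Int) (cc : Option Char),
    sameLenA (List.replicate (q + 1) '0' ++ t) o z cc = sameLenA t o (z + q + 1) (some '0') := by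
  intro q
  induction q with
  | zero => intro t o z cc; simp [List.replicate, sameLenA]
  | succ q ih =>
    intro t o z cc
    rw [List.replicate_succ, List.cons_append]
    simp only [sameLenA]
    norm_num
    rw [if_neg (show ¬('0':Char) = '1' by decide), ih]
    congr 1
    ring

theorem lem_fail0 : ∀ (t : List Char) (z : Int), 0 < z → sameLenA t 0 z (some '0') = false := by
  intro t
  induction t with
  | nil => intro z hz; simp [sameLenA]; omega
  | cons c rest ih =>
    intro z hz
    by_cases h1 : c = '1'
    · subst h1
      simp only [sameLenA]
      norm_num
      intro h; omega
    · by_cases h0 : c = '0'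
      · subst h0
        simp only [sameLenA]
        norm_num
        exact ih (z + 1) (by omega)
      · simp only [sameLenA]
        rw [if_neg (by simp [h1]), if_neg (by simp [h0])]

theorem lem_takeWhile_replicate : ∀ (l : List Char) (c : Char),
    l.takeWhile (fun x => x == c) = List.replicate (l.takeWhile (fun x => x == c)).length c := by
  intro l c
  induction l with
  | nil => rfl
  | cons x rest ih =>
    by_cases h : x = c
    · subst h
      simp only [List.takeWhile_cons, beq_self_eq_true, if_true, List.length_cons,
        List.replicate_succ, List.cons.injEq, true_and]
      exact ih
    · simp [h]

theorem lem_cp0 : ∀ (m : Int) (rs : List (Char × Int)), checkPairsB (('0', m) :: rs) = false := by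
  intro m rs
  cases rs with
  | nil => rfl
  | cons p rs' =>
    obtain ⟨c2, n2⟩ := p
    simp [checkPairsB]

theorem lem_rle : ∀ (k : ℕ) (c : Char) (t : List Char), (∀ x ∈ t.head?, x ≠ c) →
    rleB (List.replicate (k + 1) c ++ t) = (c, (1 : Int) + k) :: rleB t := by
  intro k c t ht
  have htw : t.takeWhile (fun x => x == c) = [] := by
    cases t with
    | nil => rfl
    | cons y t1 =>
      have : y ≠ c := ht y (by simp)
      simp [List.takeWhile_cons, this]
  have hrep : (List.replicate k c ++ t).takeWhile (fun x => x == c) = List.replicate k c := by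
    induction k with
    | zero => simpa using htw
    | succ k ih => simp [List.replicate_succ, List.takeWhile_cons, ih]
  rw [List.replicate_succ, List.cons_append, rleB]
  rw [hrep, List.length_replicate, List.drop_left' (by simp)]

theorem lem_dropWhile_head : ∀ (l : List Char) (c x : Char),
    x ∈ (l.dropWhile (fun y => y == c)).head? → x ≠ c := by
  intro l c
  induction l with
  | nil => intro x hx; simp at hx
  | cons y rest ih =>
    intro x hx
    by_cases hy : y = c
    · subst hy
      rw [List.dropWhile_cons, if_pos (by simp)] at hx
      exact ih x hx
    · rw [List.dropWhile_cons, if_neg (by simp [hy])] at hx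
      simp at hx
      subst hx; exact hy

theorem lem_split : ∀ (l : List Char) (c : Char), ∃ k r, l = List.replicate k c ++ r ∧ ∀ x ∈ r.head?, x ≠ c := by
  intro l c
  refine ⟨(l.takeWhile (fun x => x == c)).length, l.dropWhile (fun x => x == c), ?_, ?_⟩
  · rw [← lem_takeWhile_replicate]
    exact (List.takeWhile_append_dropWhile).symm
  · exact fun x hx => lem_dropWhile_head l c x hx

theorem main_list : ∀ (n : ℕ) (s : List Char), s.length ≤ n →
    sameLenA s 0 0 none = (if s.any (fun c => !(c == '0' || c == '1')) then false else checkPairsB (rleB s)) := by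
  intro n
  induction n with
  | zero =>
    intro s hs
    have : s = [] := List.length_eq_zero_iff.mp (Nat.le_zero.mp hs)
    subst this
    simp [sameLenA, rleB, checkPairsB]
  | succ n ih =>
    intro s hs
    cases s with
    | nil => simp [sameLenA, rleB, checkPairsB]
    | cons c r0 =>
      have hs0 : r0.length ≤ n := by simp at hs; omega
      by_cases hc1 : c = '1'
      · subst hc1
        -- decompose the leading run of '1's
        obtain ⟨k, r, hr0, hrhead⟩ := lem_split r0 '1'
        subst hr0
        have hs' : ('1' :: (List.replicate k '1' ++ r)) = List.replicate (k + 1) '1' ++ r := by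
          rw [List.replicate_succ, List.cons_append]
        have hlhs : sameLenA ('1' :: (List.replicate k '1' ++ r)) 0 0 none
            = sameLenA r (1 + k) 0 (some '1') := by
          simp only [sameLenA]
          norm_num
          rw [lem_ones]
        have hrle : rleB ('1' :: (List.replicate k '1' ++ r)) = ('1', (1 : Int) + k) :: rleB r := by
          rw [hs', lem_rle k '1' r hrhead]
        have hany : (('1' :: (List.replicate k '1' ++ r)).any (fun c => !(c == '0' || c == '1')))
            = r.any (fun c => !(c == '0' || c == '1')) := by
          simp [List.any_append, List.any_replicate]
        rw [hlhs, hrle, hany]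
        have hrn : r.length ≤ n := by simp at hs0; omega
        cases r with
        | nil =>
          simp [sameLenA, checkPairsB, beq_iff_eq]
          rw [show rleB ([] : List Char) = [] by simp [rleB]]
          simp [checkPairsB]
          omega
        | cons d r1 =>
          by_cases hd0 : d = '0'
          · subst hd0
            obtain ⟨j, t, hr1, hthead⟩ := lem_split r1 '0'
            subst hr1
            have hs'' : ('0' :: (List.replicate j '0' ++ t)) = List.replicate (j + 1) '0' ++ t := by
              rw [List.replicate_succ, List.cons_append]
            have hlhs2 : sameLenA ('0' :: (List.replicate j '0' ++ t)) (1 + k) 0 (some '1')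
                = sameLenA t (1 + k) (0 + j + 1) (some '0') := by
              rw [hs'', lem_zeros]
            have hrle2 : rleB ('0' :: (List.replicate j '0' ++ t)) = ('0', (1 : Int) + j) :: rleB t := by
              rw [hs'', lem_rle j '0' t hthead]
            have hany2 : (('0' :: (List.replicate j '0' ++ t)).any (fun c => !(c == '0' || c == '1')))
                = t.any (fun c => !(c == '0' || c == '1')) := by
              simp [List.any_append, List.any_replicate]
            rw [hlhs2, hrle2, hany2]
            have htn : t.length ≤ n := by simp at hrn; omega
            cases t with
            | nil =>
              simp [sameLenA, checkPairsB, beq_iff_eq]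
              rw [show rleB ([] : List Char) = [] by simp [rleB]]
              simp only [checkPairsB, Bool.and_true]
              have hbe : ((1 + (k : Int)) == ((j : Int) + 1)) = decide (k = j) := by
                by_cases h : k = j
                · subst h; simp; omega
                · simp [h]; omega
              rw [hbe]
            | cons e t1 =>
              by_cases he1 : e = '1'
              · subst he1
                have iht := ih ('1' :: t1) htn
                simp only [sameLenA] at iht ⊢
                norm_num at iht ⊢
                by_cases heq : (1 + (k : Int)) = (j : Int) + 1
                · rw [show (decide (1 + (k : Int) = (j : Int) + 1)) = true by simp [heq], Bool.true_and, iht]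
                  congr 1
                  simp only [checkPairsB]
                  rw [if_neg (by simp [bne]; omega)]
                · rw [show (decide (1 + (k : Int) = (j : Int) + 1)) = false by simp [heq], Bool.false_and]
                  symm
                  simp only [checkPairsB]
                  rw [if_pos (by simp [bne]; omega)]
                  simp
              · have he0 : e ≠ '0' := hthead e (by simp)
                have hlhs3 : sameLenA (e :: t1) (1 + k) (0 + j + 1) (some '0') = false := by
                  simp only [sameLenA]
                  rw [if_neg (by simp [he1]), if_neg (by simp [he0])]
                rw [hlhs3]
                have : (e :: t1).any (fun c => !(c == '0' || c == '1')) = true := by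
                  simp [he0, he1]
                rw [this]
                simp
          · -- d is neither '0' nor '1': A fails at d, B sees a bad char
            have hd1 : d ≠ '1' := hrhead d (by simp)
            have hlhs3 : sameLenA (d :: r1) (1 + k) 0 (some '1') = false := by
              simp only [sameLenA]
              rw [if_neg (by simp [hd1]), if_neg (by simp [hd0])]
            rw [hlhs3]
            have : (d :: r1).any (fun c => !(c == '0' || c == '1')) = true := by
              simp [hd0, hd1]
            rw [this]
            simp
      · by_cases hc0 : c = '0'
        · subst hc0
          have hlhs : sameLenA ('0' :: r0) 0 0 none = false := by
            simp only [sameLenA]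
            norm_num
            exact lem_fail0 r0 1 one_pos
          rw [hlhs, rleB, lem_cp0]
          simp
        · have hlhs : sameLenA (c :: r0) 0 0 none = false := by
            simp only [sameLenA]
            rw [if_neg (by simp [hc1]), if_neg (by simp [hc0])]
          rw [hlhs]
          have : (c :: r0).any (fun c => !(c == '0' || c == '1')) = true := by
            simp [hc0, hc1]
          rw [this]
          simp

-- ===== VERDICT (by name: the statement is the Claim_ definition above) =====
theorem same_length_spec : Claim_equal_same_length := by
  intro txt _
  unfold Spec_same_length same_length same_length_alt
  exact main_list txt.toList.length txt.toList le_rfl
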